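-- pv_equiv track=rewrite | github.com/Arkaeriit/www.bobignou.red | renderer.py | fix_internals_path
-- ===== SOURCE A (Python) =====
-- def fix_internals_path(html_txt, prefix):
--     """On all path not prefixed found in the input HTML, add the given
--     prefix."""
--     all_slices = html_txt.split(' src="')
--     ret = all_slices[0]
--     for i in range(1, len(all_slices)):
--         ret += ' src="'
--         slice = all_slices[i]
--         link = slice.split('"')[0]
--         if link.find("/") < 0: # Not a full link
--             ret += prefix
--         ret += slice
--     return ret
-- ===== SOURCE B (Python) =====
-- def fix_internals_path(html_txt, prefix):
--     """On all path not prefixed found in the input HTML, add the given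
--     prefix."""
--     # Split on double quotes instead of on the marker: a marker occurrence is
--     # exactly a quote whose preceding segment ends with ' src=', and the link
--     # text checked for '/' is exactly the segment that follows that quote.
--     segs = html_txt.split('"')
--     out = [segs[0]]
--     for k in range(1, len(segs)):
--         out.append('"')
--         if segs[k - 1].endswith(' src=') and '/' not in segs[k]:
--             out.append(prefix)
--         out.append(segs[k])
--     return ''.join(out)
-- ===== Notes on version B (the rewrite author's own statement) =====
-- stated objective: alternative
-- what changed: Instead of splitting on the marker ' src="' and re-scanning each slice for its link, B splits the document on double quotes once and decides each insertion point locally: a prefix goes after a quote exactly when the preceding quote-segment ends with ' src=' and the following quote-segment contains no '/'.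
import Mathlib
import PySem

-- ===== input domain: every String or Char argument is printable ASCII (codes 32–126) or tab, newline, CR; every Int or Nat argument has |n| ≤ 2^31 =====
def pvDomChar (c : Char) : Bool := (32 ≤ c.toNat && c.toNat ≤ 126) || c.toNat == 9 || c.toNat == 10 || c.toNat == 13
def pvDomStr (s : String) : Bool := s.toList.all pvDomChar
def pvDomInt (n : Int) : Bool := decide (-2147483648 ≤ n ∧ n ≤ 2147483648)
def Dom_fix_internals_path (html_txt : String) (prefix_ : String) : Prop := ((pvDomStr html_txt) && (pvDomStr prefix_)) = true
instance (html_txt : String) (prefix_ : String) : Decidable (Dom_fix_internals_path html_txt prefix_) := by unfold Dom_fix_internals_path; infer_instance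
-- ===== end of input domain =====

-- B replaces A's split-on-the-marker scan with a split on double quotes: an insertion
-- point is a quote whose preceding segment ends with ' src=' and whose following
-- segment has no '/'; same cost, genuinely different decomposition of the string.

-- ===== PORT A =====
def fix_internals_path (html_txt : String) (prefix_ : String) : String :=
  -- all_slices = html_txt.split(' src="')
  let all_slices := PySem.Chars.splitOn html_txt.toList " src=\"".toList
  -- ret = all_slices[0]  (split always yields at least one slice, so [0] never raises);
  -- for i in range(1, len(all_slices)): slice = all_slices[i]  ⇒  left fold over the slices after the first.
  -- Each step, in Python's order: ret += ' src="'; link = slice.split('"')[0];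
  -- if link.find("/") < 0: ret += prefix; ret += slice.
  String.mk (all_slices.tail.foldl (fun ret slice =>
      (if PySem.Chars.find ((PySem.Chars.splitOn slice "\"".toList).headD []) "/".toList < 0
        then ret ++ " src=\"".toList ++ prefix_.toList
        else ret ++ " src=\"".toList) ++ slice)
    (all_slices.headD []))

-- ===== PORT B =====
def fix_internals_path_alt (html_txt : String) (prefix_ : String) : String :=
  -- segs = html_txt.split('"')
  let segs := PySem.Chars.splitOn html_txt.toList "\"".toList
  -- out = [segs[0]]; for k in range(1, len(segs)):  ⇒  fold over the adjacent pairs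
  -- (segs[k-1], segs[k]); each step appends '"', then prefix if segs[k-1] ends with
  -- ' src=' and '/' not in segs[k], then segs[k]; return ''.join(out)
  String.mk (PySem.Chars.join []
    ((segs.zip segs.tail).foldl (fun out pc =>
        (out ++ [['"']]) ++
        (if PySem.Chars.endswith pc.1 " src=".toList && !(PySem.Chars.isIn "/".toList pc.2)
          then [prefix_.toList] else []) ++ [pc.2])
      [segs.headD []]))

-- ===== PRECONDITION & SPEC =====
def Spec_fix_internals_path (html_txt : String) (prefix_ : String) (out : String) : Prop := out = fix_internals_path_alt html_txt prefix_
instance (html_txt : String) (prefix_ : String) (out : String) : Decidable (Spec_fix_internals_path html_txt prefix_ out) := by unfold Spec_fix_internals_path; infer_instance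

-- ===== CLAIM (what is proved, stated in full; the proofs are below) =====
def Claim_equal_fix_internals_path : Prop := ∀ (html_txt : String) (prefix_ : String), Dom_fix_internals_path html_txt prefix_ → Spec_fix_internals_path html_txt prefix_ (fix_internals_path html_txt prefix_)

-- ===== LEMMAS AND PROOFS =====

-- the needle ' src="' without its leading space
def pvSp : List Char := ['s', 'r', 'c', '=', '"']

-- reference splitter: Python's s.split(a::sp) as a plain structural recursion
def spl (a : Char) (sp : List Char) : List Char → List (List Char)
  | [] => [[]]
  | c :: rest =>
    if (a :: sp).isPrefixOf (c :: rest) then [] :: spl a sp (rest.drop sp.length)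
    else (spl a sp rest).modifyHead (c :: ·)
termination_by l => l.length
decreasing_by
  · simp only [List.length_drop, List.length_cons]; omega
  · simp

-- what A appends for one slice after the first
def gA (pre slice : List Char) : List Char :=
  " src=\"".toList ++
    (if PySem.Chars.find ((PySem.Chars.splitOn slice "\"".toList).headD []) "/".toList < 0
      then pre else []) ++ slice

-- A's result on the character list, in closed form
def aShapeL (pre t : List Char) : List Char :=
  (spl ' ' pvSp t).headD [] ++ (spl ' ' pvSp t).tail.flatMap (gA pre)

-- what B appends for one adjacent pair of quote-segments
def gB (pre : List Char) (pc : List Char × List Char) : List Char :=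
  '"' :: ((if PySem.Chars.endswith pc.1 " src=".toList && !(PySem.Chars.isIn "/".toList pc.2)
    then pre else []) ++ pc.2)

-- B's result on the character list, in closed form
def bShapeL (pre t : List Char) : List Char :=
  (spl '"' [] t).headD [] ++ ((spl '"' [] t).zip (spl '"' [] t).tail).flatMap (gB pre)

theorem spl_ne_nil (a : Char) (sp l : List Char) : spl a sp l ≠ [] := by
  induction l with
  | nil => simp [spl]
  | cons c rest ih =>
    simp only [spl]
    split
    · simp
    · simpa [List.modifyHead_eq_nil_iff] using ih

theorem splitOn_go_eq (a : Char) (sp : List Char) (fuel : Nat) :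
    ∀ (l cur : List Char) (acc : List (List Char)), l.length < fuel →
    PySem.Chars.splitOn.go (a :: sp) fuel l cur acc
      = acc.reverse ++ (spl a sp l).modifyHead (cur.reverse ++ ·) := by
  induction fuel with
  | zero => intro l cur acc h; omega
  | succ f ih =>
    intro l cur acc h
    cases l with
    | nil =>
      rw [PySem.Chars.splitOn.go.eq_def]
      simp [spl]
    | cons c rest =>
      rw [PySem.Chars.splitOn.go.eq_def]
      by_cases hp : (a :: sp).isPrefixOf (c :: rest)
      · have hlt : (List.drop sp.length rest).length < f := by
          simp only [List.length_drop]
          simp only [List.length_cons] at h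
          omega
        have hdrop : List.drop (a :: sp).length (c :: rest) = List.drop sp.length rest := by
          simp [List.length_cons]
        simp only [hp, if_true, hdrop, ih _ _ _ hlt]
        have hid : (fun x : List Char => List.reverse [] ++ x) = id := by
          funext x; simp
        simp only [spl, hp, if_true, hid, id]
        simp only [List.modifyHead_cons, List.reverse_cons]
        rw [show (fun x : List Char => x) = id from rfl, List.modifyHead_id, id]
        simp
      · have hlt : rest.length < f := by
          simp only [List.length_cons] at h; omega
        simp only [hp, if_false, Bool.false_eq_true, ih _ _ _ hlt]
        simp only [spl, hp, if_false, Bool.false_eq_true]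
        rw [List.modifyHead_modifyHead]
        have hfun : (fun x : List Char => (c :: cur).reverse ++ x)
            = ((fun x : List Char => cur.reverse ++ x) ∘ fun x : List Char => c :: x) := by
          funext x
          simp
        rw [hfun]

theorem splitOn_eq_spl (a : Char) (sp s : List Char) :
    PySem.Chars.splitOn s (a :: sp) = spl a sp s := by
  have h := splitOn_go_eq a sp (s.length + 1) s [] [] (by omega)
  rw [PySem.Chars.splitOn, h]
  rw [show (fun x : List Char => List.reverse [] ++ x) = id from (by funext x; simp),
    List.modifyHead_id]
  simp

theorem spl_no_occ (a : Char) (sp : List Char) {l : List Char}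
    (h : ¬ (a :: sp) <:+: l) : spl a sp l = [l] := by
  induction l with
  | nil => simp [spl]
  | cons c rest ih =>
    simp only [spl]
    have hp : ¬ (a :: sp).isPrefixOf (c :: rest) := by
      intro hc
      exact h (List.isPrefixOf_iff_prefix.mp hc).isInfix
    rw [if_neg hp, ih (fun hc => h (List.infix_cons hc))]
    simp [List.modifyHead_cons]

theorem spl_break (a : Char) (sp : List Char) : ∀ (n : Nat) (l : List Char),
    (a :: sp) <+: l.drop n → (∀ i, i < n → ¬ (a :: sp) <+: l.drop i) →
    spl a sp l = l.take n :: spl a sp (l.drop (n + sp.length + 1)) := by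
  intro n
  induction n with
  | zero =>
    intro l hpre _
    cases l with
    | nil => simp at hpre
    | cons c rest =>
      have hp : (a :: sp).isPrefixOf (c :: rest) :=
        List.isPrefixOf_iff_prefix.mpr (by simpa using hpre)
      simp only [spl, hp, if_true, List.take_zero, Nat.zero_add, List.drop_succ_cons]
  | succ m ih =>
    intro l hpre hmin
    cases l with
    | nil => simp at hpre
    | cons c rest =>
      have hp0 : ¬ (a :: sp).isPrefixOf (c :: rest) := by
        intro hc
        exact hmin 0 (Nat.succ_pos m) (by simpa using List.isPrefixOf_iff_prefix.mp hc)
      simp only [spl, hp0, if_false, Bool.false_eq_true]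
      rw [ih rest (by simpa [List.drop_succ_cons] using hpre)
        (fun i hi => by simpa [List.drop_succ_cons] using hmin (i + 1) (by omega))]
      have harith : m + 1 + sp.length + 1 = (m + sp.length + 1) + 1 := by omega
      rw [harith]
      simp [List.take_succ_cons, List.drop_succ_cons, List.modifyHead_cons]

theorem spl_headD_quote (q : Char) (l : List Char) :
    (spl q [] l).headD [] = l.takeWhile (· != q) := by
  induction l with
  | nil => simp [spl]
  | cons c rest ih =>
    simp only [spl]
    by_cases hc : c = q
    · subst hc
      rw [if_pos (by simp [List.isPrefixOf])]
      simp
    · rw [if_neg (by simp [List.isPrefixOf]; exact fun h => hc h.symm)]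
      cases hspl : spl q [] rest with
      | nil => exact absurd hspl (spl_ne_nil q [] rest)
      | cons h t =>
        rw [hspl] at ih
        simp only [List.headD_cons] at ih
        simp [List.modifyHead_cons, hc, ih]

theorem mem_takeWhile_append_needle (h z : List Char) :
    ('/' ∈ (h ++ (' ' :: pvSp) ++ z).takeWhile (· != '"')) ↔
      ('/' ∈ h.takeWhile (· != '"')) := by
  rw [List.append_assoc, List.takeWhile_append]
  by_cases hl : (h.takeWhile (· != '"')).length = h.length
  · rw [if_pos hl]
    have hself : h.takeWhile (· != '"') = h :=
      (List.takeWhile_prefix _).eq_of_length hl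
    have hmid : ((' ' :: pvSp) ++ z).takeWhile (· != '"') = [' ', 's', 'r', 'c', '='] := by
      simp [pvSp]
    rw [hmid, hself, List.mem_append]
    simp
  · rw [if_neg hl]

theorem join_nil_eq_flatten (ps : List (List Char)) :
    PySem.Chars.join [] ps = ps.flatten := by
  induction ps with
  | nil => simp [PySem.Chars.join_nil]
  | cons p t ih =>
    cases t with
    | nil => simp [PySem.Chars.join_singleton]
    | cons q r =>
      rw [PySem.Chars.join_cons_cons, ih]
      simp

theorem condA_iff (sl : List Char) :
    (PySem.Chars.find ((PySem.Chars.splitOn sl "\"".toList).headD []) "/".toList < 0)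
      ↔ '/' ∉ sl.takeWhile (· != '"') := by
  have e1 : ("\"".toList : List Char) = '"' :: [] := rfl
  rw [e1, splitOn_eq_spl, spl_headD_quote]
  have e2 : ("/".toList : List Char) = ['/'] := rfl
  rw [e2]
  have hle := PySem.Chars.neg_one_le_find (sl.takeWhile (· != '"')) ['/']
  have hiff := PySem.Chars.find_eq_neg_one_iff (sl.takeWhile (· != '"')) ['/']
  rw [List.singleton_infix_iff] at hiff
  constructor
  · intro hlt hmem
    exact (hiff.mp (by omega)) hmem
  · intro hnot
    have := hiff.mpr hnot
    omega

-- the membership condition A tests on a slice agrees with the quote-limited one on the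
-- text after the marker (the slice is the head of the needle-split of that text)
theorem cond_transfer (cs' : List Char) :
    ('/' ∈ cs'.takeWhile (· != '"')) ↔
      ('/' ∈ ((spl ' ' pvSp cs').headD []).takeWhile (· != '"')) := by
  by_cases hf : PySem.Chars.find cs' " src=\"".toList = -1
  · have hno : ¬ (' ' :: pvSp) <:+: cs' := by
      rw [show (' ' :: pvSp : List Char) = " src=\"".toList from rfl]
      exact (PySem.Chars.find_eq_neg_one_iff _ _).mp hf
    rw [spl_no_occ ' ' pvSp hno]
    simp
  · have hge : 0 ≤ PySem.Chars.find cs' " src=\"".toList := by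
      have := PySem.Chars.neg_one_le_find cs' " src=\"".toList
      omega
    obtain ⟨hpre, hmin⟩ := PySem.Chars.find_spec (s := cs') (sub := " src=\"".toList) hge
    set n2 := (PySem.Chars.find cs' " src=\"".toList).toNat with hn2
    have hbreak := spl_break ' ' pvSp n2 cs'
      (by rw [show (' ' :: pvSp : List Char) = " src=\"".toList from rfl]; exact hpre)
      (by intro j hj
          rw [show (' ' :: pvSp : List Char) = " src=\"".toList from rfl]
          exact hmin j hj)
    obtain ⟨z, hz⟩ := hpre
    rw [show (" src=\"".toList : List Char) = ' ' :: pvSp from rfl] at hz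
    have hcs : cs' = cs'.take n2 ++ (' ' :: pvSp) ++ z := by
      conv_lhs => rw [← List.take_append_drop n2 cs']
      rw [← hz, List.append_assoc]
    rw [hbreak]
    simp only [List.headD_cons]
    conv_lhs => rw [hcs]
    rw [mem_takeWhile_append_needle]

-- A's fold, flattened
theorem foldl_step_eq (pre : List Char) (l : List (List Char)) (acc : List Char) :
    l.foldl (fun ret slice =>
      (if PySem.Chars.find ((PySem.Chars.splitOn slice "\"".toList).headD []) "/".toList < 0
        then ret ++ " src=\"".toList ++ pre
        else ret ++ " src=\"".toList) ++ slice) acc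
      = acc ++ l.flatMap (gA pre) := by
  induction l generalizing acc with
  | nil => simp
  | cons s t ih =>
    rw [List.foldl_cons, ih]
    simp only [List.flatMap_cons, gA]
    split_ifs with hc <;> simp [List.append_assoc]

theorem a_shape (html pre : String) :
    fix_internals_path html pre = String.mk (aShapeL pre.toList html.toList) := by
  simp only [fix_internals_path, aShapeL, foldl_step_eq]
  rw [show (" src=\"".toList : List Char) = ' ' :: pvSp from rfl, splitOn_eq_spl]

-- B's fold, as a flatMap of per-pair piece lists
theorem foldlB_eq (pre : List Char) (l : List (List Char × List Char))
    (acc : List (List Char)) :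
    l.foldl (fun out pc =>
        (out ++ [['"']]) ++
        (if PySem.Chars.endswith pc.1 " src=".toList && !(PySem.Chars.isIn "/".toList pc.2)
          then [pre] else []) ++ [pc.2]) acc
      = acc ++ l.flatMap (fun pc =>
          [['"']] ++
          (if PySem.Chars.endswith pc.1 " src=".toList && !(PySem.Chars.isIn "/".toList pc.2)
            then [pre] else []) ++ [pc.2]) := by
  induction l generalizing acc with
  | nil => simp
  | cons p t ih =>
    rw [List.foldl_cons, ih]
    split_ifs with hc <;> simp_all [List.append_assoc]

theorem flatten_pieces (pre : List Char) (l : List (List Char × List Char)) :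
    (l.flatMap (fun pc =>
        [['"']] ++
        (if PySem.Chars.endswith pc.1 " src=".toList && !(PySem.Chars.isIn "/".toList pc.2)
          then [pre] else []) ++ [pc.2])).flatten
      = l.flatMap (gB pre) := by
  induction l with
  | nil => simp
  | cons p t ih =>
    simp only [List.flatMap_cons, List.flatten_append, ih, gB]
    split_ifs with hc <;> simp

theorem b_shape (html pre : String) :
    fix_internals_path_alt html pre = String.mk (bShapeL pre.toList html.toList) := by
  simp only [fix_internals_path_alt, bShapeL]
  rw [show ("\"".toList : List Char) = '"' :: [] from rfl, splitOn_eq_spl,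
    foldlB_eq, join_nil_eq_flatten]
  rw [List.flatten_append, flatten_pieces]
  simp

-- decomposition at the first quote
theorem quote_decomp : ∀ (cs : List Char), '"' ∈ cs →
    cs = cs.takeWhile (· != '"') ++ '"' :: (cs.dropWhile (· != '"')).tail := by
  intro cs
  induction cs with
  | nil => simp
  | cons c t ih =>
    intro hmem
    by_cases hc : c = '"'
    · subst hc
      simp
    · have ht : '"' ∈ t := by
        rcases List.mem_cons.mp hmem with h | h
        · exact absurd h.symm hc
        · exact h
      have hcb : (c != '"') = true := by simp [hc]
      simp only [List.takeWhile_cons, List.dropWhile_cons, hcb, if_true, List.cons_append]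
      exact congrArg (c :: ·) (ih ht)

theorem spl_quote_cons : ∀ (cs : List Char), '"' ∈ cs →
    spl '"' [] cs = cs.takeWhile (· != '"') :: spl '"' [] ((cs.dropWhile (· != '"')).tail) := by
  intro cs
  induction cs with
  | nil => simp
  | cons c t ih =>
    intro hmem
    by_cases hc : c = '"'
    · subst hc
      rw [show spl '"' [] ('"' :: t) = [] :: spl '"' [] (t.drop 0) from by
        simp [spl, List.isPrefixOf]]
      simp
    · have ht : '"' ∈ t := by
        rcases List.mem_cons.mp hmem with h | h
        · exact absurd h.symm hc
        · exact h
      have hcb : (c != '"') = true := by simp [hc]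
      have hp : ¬ (['"'] : List Char).isPrefixOf (c :: t) := by
        simp [List.isPrefixOf]
        exact fun h => hc h.symm
      simp only [spl, hp, if_false, Bool.false_eq_true, ih ht, List.modifyHead_cons,
        List.takeWhile_cons, List.dropWhile_cons, hcb, if_true]

-- position of a needle occurrence relative to a quote-free block before a quote
theorem needle_pos (q0 cs' : List Char) (hq : ∀ c ∈ q0, c ≠ '"') (i : Nat)
    (hi : i ≤ q0.length)
    (h : (" src=\"".toList) <+: (q0 ++ '"' :: cs').drop i) :
    i + 5 = q0.length ∧ (" src=".toList) <:+ q0 := by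
  have hlen6 : (" src=\"".toList).length = 6 := rfl
  have hll : (q0 ++ '"' :: cs').length = q0.length + 1 + cs'.length := by
    simp
    omega
  have hle := h.length_le
  rw [hlen6, List.length_drop, hll] at hle
  obtain ⟨tl, htl⟩ := h
  have hget : ∀ (j : Nat), i ≤ j → j < i + 6 →
      (q0 ++ '"' :: cs')[j]? = (" src=\"".toList)[j - i]? := by
    intro j h1 h2
    have e1 : (q0 ++ '"' :: cs')[j]? = ((q0 ++ '"' :: cs').drop i)[j - i]? := by
      rw [List.getElem?_drop]
      congr 1
      omega
    rw [e1, ← htl, List.getElem?_append_left (by rw [hlen6]; omega)]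
  have hquote : (q0 ++ '"' :: cs')[q0.length]? = some '"' := by
    rw [List.getElem?_append_right (le_refl _), Nat.sub_self]
    rfl
  have hq5 : i + 5 = q0.length := by
    by_contra hne
    rcases Nat.lt_or_ge (i + 5) q0.length with hlt | hge
    · have h1 := hget (i + 5) (by omega) (by omega)
      rw [show i + 5 - i = 5 from by omega] at h1
      rw [List.getElem?_append_left (by omega)] at h1
      have h2 : q0[i + 5]? = some '"' := by
        rw [h1]
        rfl
      have h3 : q0[i + 5]'hlt = '"' := by
        have := List.getElem?_eq_getElem (l := q0) (i := i + 5) hlt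
        rw [this] at h2
        exact Option.some.inj h2
      exact hq _ (List.getElem_mem _) h3
    · have hdub : q0.length < i + 5 := by omega
      set d := q0.length - i with hdd
      have hd4 : d ≤ 4 := by omega
      have h3 : (" src=\"".toList)[d]? = some '"' := by
        rw [← hget q0.length hi (by omega), hquote]
      interval_cases d <;> exact absurd h3 (by decide)
  refine ⟨hq5, ?_⟩
  have hdrop : q0.drop i = " src=".toList := by
    apply List.ext_getElem?
    intro k
    by_cases hk : k < 5
    · rw [List.getElem?_drop]
      have h5 := hget (i + k) (by omega) (by omega)
      rw [show i + k - i = k from by omega] at h5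
      rw [List.getElem?_append_left (by omega)] at h5
      rw [h5, show (" src=\"".toList) = (" src=".toList) ++ ['"'] from rfl,
        List.getElem?_append_left (by rw [show (" src=".toList).length = 5 from rfl]; omega)]
    · rw [List.getElem?_eq_none (by rw [List.length_drop]; omega),
        List.getElem?_eq_none (by rw [show (" src=".toList).length = 5 from rfl]; omega)]
  exact ⟨q0.take i, by rw [← hdrop, List.take_append_drop]⟩

-- splitting a list whose head region contains no occurrence start
theorem spl_no_start (a : Char) (sp : List Char) : ∀ (w v : List Char),
    (∀ i, i < w.length → ¬ (a :: sp) <+: (w ++ v).drop i) →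
    spl a sp (w ++ v) = (spl a sp v).modifyHead (w ++ ·) := by
  intro w
  induction w with
  | nil =>
    intro v _
    rw [show (fun x : List Char => [] ++ x) = id from (by funext x; simp), List.modifyHead_id]
    simp
  | cons c t ih =>
    intro v hno
    have hp : ¬ (a :: sp).isPrefixOf ((c :: t) ++ v) := by
      intro hc
      exact hno 0 (by simp) (by simpa using List.isPrefixOf_iff_prefix.mp hc)
    rw [List.cons_append, show spl a sp (c :: (t ++ v))
        = (spl a sp (t ++ v)).modifyHead (c :: ·) from by
      simp only [spl]
      rw [if_neg (by simpa using hp)]]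
    rw [ih v (fun i hi => by
      have := hno (i + 1) (by simp; omega)
      simpa using this)]
    rw [List.modifyHead_modifyHead]
    congr 1

-- A's closed form over one quote-segment that ends with ' src='
theorem aShape_step_src (pre q0 cs' : List Char) (hq : ∀ c ∈ q0, c ≠ '"')
    (hsuf : (" src=".toList) <:+ q0) :
    aShapeL pre (q0 ++ '"' :: cs')
      = q0 ++ '"' :: ((if '/' ∈ cs'.takeWhile (· != '"') then [] else pre)
          ++ aShapeL pre cs') := by
  obtain ⟨u, hu⟩ := hsuf
  have hl : q0 ++ '"' :: cs' = (u ++ " src=\"".toList) ++ cs' := by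
    rw [← hu]
    simp [show (" src=\"".toList : List Char) = " src=".toList ++ ['"'] from rfl]
  have hn : u.length + 5 = q0.length := by
    rw [← hu]
    simp
  have hpre : (" src=\"".toList) <+: (q0 ++ '"' :: cs').drop u.length := by
    rw [hl, List.append_assoc, List.drop_left]
    exact ⟨cs', rfl⟩
  have hmin : ∀ i, i < u.length → ¬ (' ' :: pvSp) <+: (q0 ++ '"' :: cs').drop i := by
    intro i hi hc
    rw [show (' ' :: pvSp : List Char) = " src=\"".toList from rfl] at hc
    have := (needle_pos q0 cs' hq i (by omega) hc).1
    omega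
  have hbreak := spl_break ' ' pvSp u.length (q0 ++ '"' :: cs')
    (by rw [show (' ' :: pvSp : List Char) = " src=\"".toList from rfl]; exact hpre) hmin
  have htake : (q0 ++ '"' :: cs').take u.length = u := by
    rw [hl, List.append_assoc, List.take_append_of_le_length (by simp), List.take_length]
  have hdrop : (q0 ++ '"' :: cs').drop (u.length + pvSp.length + 1) = cs' := by
    rw [hl]
    have : u.length + pvSp.length + 1 = (u ++ " src=\"".toList).length := by
      simp [pvSp]
    rw [this, List.drop_left]
  rw [aShapeL, hbreak, htake, hdrop]
  cases hspl : spl ' ' pvSp cs' with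
  | nil => exact absurd hspl (spl_ne_nil ' ' pvSp cs')
  | cons h' t' =>
    have hcond := cond_transfer cs'
    rw [hspl] at hcond
    simp only [List.headD_cons] at hcond
    simp only [List.headD_cons, List.tail_cons, List.flatMap_cons]
    rw [aShapeL, hspl]
    simp only [List.headD_cons, List.tail_cons]
    have hga : gA pre h' = " src=\"".toList ++
        (if PySem.Chars.find ((PySem.Chars.splitOn h' "\"".toList).headD []) "/".toList < 0
          then pre else []) ++ h' := rfl
    have hq0 : q0 ++ ['"'] = u ++ " src=\"".toList := by
      rw [← hu]
      simp [show (" src=\"".toList : List Char) = " src=".toList ++ ['"'] from rfl]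
    by_cases hmem : '/' ∈ cs'.takeWhile (· != '"')
    · have hA : ¬ (PySem.Chars.find ((PySem.Chars.splitOn h' "\"".toList).headD [])
          "/".toList < 0) := by
        rw [condA_iff]
        simp only [not_not]
        exact hcond.mp hmem
      rw [if_pos hmem, hga, if_neg hA]
      calc u ++ (" src=\"".toList ++ [] ++ h' ++ t'.flatMap (gA pre))
          = (u ++ " src=\"".toList) ++ (h' ++ t'.flatMap (gA pre)) := by simp
        _ = (q0 ++ ['"']) ++ ([] ++ (h' ++ t'.flatMap (gA pre))) := by rw [hq0]; simp
        _ = q0 ++ '"' :: ([] ++ (h' ++ t'.flatMap (gA pre))) := by simp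
    · have hA : PySem.Chars.find ((PySem.Chars.splitOn h' "\"".toList).headD [])
          "/".toList < 0 := by
        rw [condA_iff]
        exact fun hc => hmem (hcond.mpr hc)
      rw [if_neg hmem, hga, if_pos hA]
      calc u ++ (" src=\"".toList ++ pre ++ h' ++ t'.flatMap (gA pre))
          = (u ++ " src=\"".toList) ++ (pre ++ (h' ++ t'.flatMap (gA pre))) := by simp
        _ = (q0 ++ ['"']) ++ (pre ++ (h' ++ t'.flatMap (gA pre))) := by rw [hq0]
        _ = q0 ++ '"' :: (pre ++ (h' ++ t'.flatMap (gA pre))) := by simp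

-- A's closed form over one quote-segment that does NOT end with ' src='
theorem aShape_step_plain (pre q0 cs' : List Char) (hq : ∀ c ∈ q0, c ≠ '"')
    (hns : ¬ (" src=".toList) <:+ q0) :
    aShapeL pre (q0 ++ '"' :: cs') = q0 ++ '"' :: aShapeL pre cs' := by
  have hno : ∀ i, i < (q0 ++ ['"']).length → ¬ (' ' :: pvSp) <+: ((q0 ++ ['"']) ++ cs').drop i := by
    intro i hi hc
    rw [show (' ' :: pvSp : List Char) = " src=\"".toList from rfl] at hc
    have hi' : i ≤ q0.length := by simp at hi; omega
    have hre : (q0 ++ ['"']) ++ cs' = q0 ++ '"' :: cs' := by simp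
    rw [hre] at hc
    exact hns (needle_pos q0 cs' hq i hi' hc).2
  have hmh := spl_no_start ' ' pvSp (q0 ++ ['"']) cs' hno
  have hre : (q0 ++ ['"']) ++ cs' = q0 ++ '"' :: cs' := by simp
  rw [hre] at hmh
  rw [aShapeL, hmh]
  cases hspl : spl ' ' pvSp cs' with
  | nil => exact absurd hspl (spl_ne_nil ' ' pvSp cs')
  | cons h' t' =>
    rw [aShapeL, hspl]
    simp

-- the two closed forms agree
theorem shapes_eq (pre : List Char) : ∀ (n : Nat) (cs : List Char), cs.length ≤ n →
    bShapeL pre cs = aShapeL pre cs := by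
  intro n
  induction n with
  | zero =>
    intro cs hcs
    have : cs = [] := by
      cases cs
      · rfl
      · simp at hcs
    subst this
    simp [bShapeL, aShapeL, spl]
  | succ m ih =>
    intro cs hcs
    by_cases hmem : '"' ∈ cs
    · set q0 := cs.takeWhile (· != '"') with hq0def
      set cs' := (cs.dropWhile (· != '"')).tail with hcs'def
      have hdec : cs = q0 ++ '"' :: cs' := quote_decomp cs hmem
      have hq : ∀ c ∈ q0, c ≠ '"' := by
        intro c hc
        have := List.mem_takeWhile_imp hc
        simpa using this
      have hlen : cs'.length ≤ m := by
        have : cs.length = q0.length + 1 + cs'.length := by rw [hdec]; simp; omega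
        omega
      have hqs : spl '"' [] cs = q0 :: spl '"' [] cs' := spl_quote_cons cs hmem
      cases hspl' : spl '"' [] cs' with
      | nil => exact absurd hspl' (spl_ne_nil '"' [] cs')
      | cons h1 t1 =>
        have hh1 : h1 = cs'.takeWhile (· != '"') := by
          have := spl_headD_quote '"' cs'
          rw [hspl'] at this
          simpa using this
        have hbl : bShapeL pre cs = q0 ++ gB pre (q0, h1) ++ ((h1 :: t1).zip t1).flatMap (gB pre) := by
          rw [bShapeL, hqs, hspl']
          simp [List.zip_cons_cons]
        have hbl' : bShapeL pre cs' = h1 ++ ((h1 :: t1).zip t1).flatMap (gB pre) := by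
          rw [bShapeL, hspl']
          simp
        have hisin : (PySem.Chars.isIn "/".toList h1 = true) ↔ '/' ∈ cs'.takeWhile (· != '"') := by
          rw [show ("/".toList : List Char) = ['/'] from rfl, PySem.Chars.isIn_iff_infix,
            List.singleton_infix_iff, hh1]
        rw [hdec] at hcs ⊢
        by_cases hsw : PySem.Chars.endswith q0 " src=".toList = true
        · have hsuf : (" src=".toList) <:+ q0 := (PySem.Chars.endswith_iff _ _).mp hsw
          rw [aShape_step_src pre q0 cs' hq hsuf, ← hdec]
          rw [hbl, gB]
          simp only [hsw, Bool.true_and]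
          rw [← ih cs' hlen, hbl']
          by_cases hm2 : '/' ∈ cs'.takeWhile (· != '"')
          · rw [if_pos hm2, hisin.mpr hm2]
            simp
          · rw [if_neg hm2, show PySem.Chars.isIn "/".toList h1 = false from by
              rcases Bool.eq_false_or_eq_true (PySem.Chars.isIn "/".toList h1) with hb | hb
              · exact absurd (hisin.mp hb) hm2
              · exact hb]
            simp
        · have hns : ¬ (" src=".toList) <:+ q0 := by
            intro hc
            exact hsw ((PySem.Chars.endswith_iff _ _).mpr hc)
          rw [aShape_step_plain pre q0 cs' hq hns, ← hdec]
          rw [hbl, gB]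
          simp only [show PySem.Chars.endswith q0 " src=".toList = false from by
            simpa using hsw, Bool.false_and, if_neg (by simp : ¬ (false = true))]
          rw [← ih cs' hlen, hbl']
          simp
    · have hnq : ¬ (['"'] : List Char) <:+: cs := by
        rw [List.singleton_infix_iff]
        exact hmem
      have hbq : spl '"' [] cs = [cs] := spl_no_occ '"' [] hnq
      have hna : ¬ (' ' :: pvSp) <:+: cs := by
        intro hinf
        exact hmem (hinf.sublist.subset (by simp [pvSp]))
      have haq : spl ' ' pvSp cs = [cs] := spl_no_occ ' ' pvSp hna
      rw [bShapeL, aShapeL, hbq, haq]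
      simp

-- ===== VERDICT (by name: the statement is the Claim_ definition above) =====
theorem fix_internals_path_spec : Claim_equal_fix_internals_path := by
  intro html_txt prefix_ _
  unfold Spec_fix_internals_path
  rw [a_shape, b_shape]
  rw [shapes_eq prefix_.toList html_txt.toList.length html_txt.toList (by omega)]
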